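-- pv_equiv track=rewrite | github.com/brickfrog/resorter.py | resorter.py | assign_levels
-- ===== SOURCE A (Python) =====
-- from typing import Any, Dict, List, Optional, Tuple, Union
--
-- def assign_levels(
--     sorted_ranks: Dict[Union[int, str], float], num_levels: int
-- ) -> Dict[Union[int, str], int]:
--     total_items = len(sorted_ranks)
--     items_per_level = total_items // num_levels
--     remainder = total_items % num_levels
--     levels = {}
--     current_level = num_levels
--     count = 0
--     for key, _ in sorted_ranks.items():
--         levels[key] = current_level
--         count += 1
--         if count >= items_per_level:
--             if remainder > 0:
--                 remainder -= 1
--             else: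
--                 current_level -= 1
--                 count = 0
--     return levels
-- ===== SOURCE B (Python) =====
-- def assign_levels(sorted_ranks, num_levels):
--     total_items = len(sorted_ranks)
--     items_per_level, remainder = divmod(total_items, num_levels)
--     labels = [num_levels] * (items_per_level + remainder)
--     if items_per_level > 0:
--         labels += [level for level in range(num_levels - 1, 0, -1)
--                    for _ in range(items_per_level)]
--     return dict(zip(sorted_ranks, labels))
-- ===== Notes on version B (the rewrite author's own statement) =====
-- stated objective: alternative
-- what changed: Replaces A's stateful counter/remainder loop by computing the whole level-label table up front via divmod (top level repeated items_per_level+remainder times, each lower level items_per_level times) and zipping it with the keys.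
-- outside the precondition, e.g. on assign_levels({'a': 1}, -1): A returns {'a': -1}, B returns {}
import Mathlib
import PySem

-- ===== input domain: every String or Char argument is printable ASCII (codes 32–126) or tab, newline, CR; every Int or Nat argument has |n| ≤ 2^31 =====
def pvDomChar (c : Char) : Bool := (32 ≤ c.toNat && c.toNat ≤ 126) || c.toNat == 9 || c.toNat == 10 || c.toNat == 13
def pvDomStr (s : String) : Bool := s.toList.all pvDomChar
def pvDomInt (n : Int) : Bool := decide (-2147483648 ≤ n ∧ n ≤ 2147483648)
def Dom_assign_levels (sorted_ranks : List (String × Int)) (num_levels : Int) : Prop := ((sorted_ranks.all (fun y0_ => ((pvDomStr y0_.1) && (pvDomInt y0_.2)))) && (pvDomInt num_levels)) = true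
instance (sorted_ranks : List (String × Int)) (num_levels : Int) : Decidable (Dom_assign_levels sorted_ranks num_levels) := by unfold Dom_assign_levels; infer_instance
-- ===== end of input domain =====

-- B builds the level-label table up front (divmod + repetition) and zips it with the keys,
-- instead of A's stateful counter/remainder loop: an alternative decomposition, same cost.


-- ===== PORT A =====
-- the body of A's for-loop, one step of the fold over the state (levels, current_level, count, remainder)
def assignStep (items_per_level : Int) : (PySem.Dict String Int × Int × Int × Int) → (String × Int) → (PySem.Dict String Int × Int × Int × Int)
  | (levels, current_level, count, remainder), (key, _) =>
    let levels := levels.insert key current_level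
    let count := count + 1
    if count ≥ items_per_level then
      if remainder > 0 then (levels, current_level, count, remainder - 1)
      else (levels, current_level - 1, 0, remainder)
    else (levels, current_level, count, remainder)

def assign_levels (sorted_ranks : List (String × Int)) (num_levels : Int) : List (String × Int) :=
  let total_items : Int := sorted_ranks.length
  let items_per_level := PySem.Int.floordiv total_items num_levels
  let remainder := PySem.Int.mod total_items num_levels
  ((sorted_ranks.foldl (assignStep items_per_level) (PySem.Dict.empty, num_levels, 0, remainder)).1).items

-- ===== PORT B =====
-- dict(zip(keys, labels)): under Pre_ the keys are distinct, so the dict is the zip list in order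
def assign_levels_alt (sorted_ranks : List (String × Int)) (num_levels : Int) : List (String × Int) :=
  let total_items : Int := sorted_ranks.length
  let items_per_level := PySem.Int.floordiv total_items num_levels
  let remainder := PySem.Int.mod total_items num_levels
  let labels := List.replicate (items_per_level + remainder).toNat num_levels ++
    (if items_per_level > 0 then
      (PySem.List.pyRange (num_levels - 1) 0 (-1)).flatMap (fun level => List.replicate items_per_level.toNat level)
     else [])
  (sorted_ranks.map Prod.fst).zip labels

-- ===== PRECONDITION & SPEC =====
-- Pre_ excludes num_levels ≤ 0 (num_levels = 0 raises ZeroDivisionError in A; a negative number of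
-- levels is a meaningless request on which A's labels counting down from num_levels and B's empty
-- dict are both arbitrary) and association lists with duplicate keys, which no Python dict argument
-- can represent.
def Pre_assign_levels (sorted_ranks : List (String × Int)) (num_levels : Int) : Prop :=
  1 ≤ num_levels ∧ (sorted_ranks.map Prod.fst).Nodup
instance (sorted_ranks : List (String × Int)) (num_levels : Int) : Decidable (Pre_assign_levels sorted_ranks num_levels) := by unfold Pre_assign_levels; infer_instance

def pvWitness_assign_levels : (List (String × Int)) × Int := ([("a", 1), ("b", 2), ("c", 3)], 2)

def Spec_assign_levels (sorted_ranks : List (String × Int)) (num_levels : Int) (out : List (String × Int)) : Prop := out = assign_levels_alt sorted_ranks num_levels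
instance (sorted_ranks : List (String × Int)) (num_levels : Int) (out : List (String × Int)) : Decidable (Spec_assign_levels sorted_ranks num_levels out) := by unfold Spec_assign_levels; infer_instance

-- ===== CLAIM (what is proved, stated in full; the proofs are below) =====
def Claim_equal_assign_levels : Prop := ∀ (sorted_ranks : List (String × Int)) (num_levels : Int), Dom_assign_levels sorted_ranks num_levels → Pre_assign_levels sorted_ranks num_levels → Spec_assign_levels sorted_ranks num_levels (assign_levels sorted_ranks num_levels)

-- ===== LEMMAS AND PROOFS =====

-- the sequence of levels A's loop assigns, as a function of the loop state only
def labSeq (ipl : Int) : Nat → Int → Int → Int → List Int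
  | 0, _, _, _ => []
  | n + 1, cur, cnt, rem =>
    if cnt + 1 ≥ ipl then
      if rem > 0 then cur :: labSeq ipl n cur (cnt + 1) (rem - 1)
      else cur :: labSeq ipl n (cur - 1) 0 rem
    else cur :: labSeq ipl n cur (cnt + 1) rem

-- A's fold appends (key, label) pairs, labels given by labSeq
lemma foldA (ipl : Int) : ∀ (l : List (String × Int)) (d : PySem.Dict String Int) (cur cnt rem : Int),
    (l.map Prod.fst).Nodup → (∀ p ∈ l, d.contains p.1 = false) →
    ((l.foldl (assignStep ipl) (d, cur, cnt, rem)).1).items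
      = d.items ++ (l.map Prod.fst).zip (labSeq ipl l.length cur cnt rem) := by
  intro l
  induction l with
  | nil => intro d cur cnt rem _ _; simp [labSeq]
  | cons hd t ih =>
    intro d cur cnt rem hnd hfresh
    obtain ⟨k, v⟩ := hd
    have hhd : d.contains k = false := hfresh (k, v) (List.mem_cons_self)
    have hnd2 : (k :: t.map Prod.fst).Nodup := by simpa using hnd
    have hnd' : (t.map Prod.fst).Nodup := hnd2.of_cons
    have hni : k ∉ t.map Prod.fst := (List.nodup_cons.mp hnd2).1
    have hfresh' : ∀ p ∈ t, (d.insert k cur).contains p.1 = false := by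
      intro p hp
      have hne : p.1 ≠ k := by
        intro h; exact hni (h ▸ List.mem_map_of_mem hp)
      rw [PySem.Dict.contains_insert]
      simp [hne, hfresh p (List.mem_cons_of_mem _ hp)]
    have hitems : (d.insert k cur).items = d.items ++ [(k, cur)] := by
      rw [PySem.Dict.items_insert, hhd]; simp
    simp only [List.foldl_cons, assignStep, List.length_cons, labSeq, List.map_cons]
    split_ifs with h1 h2
    · rw [ih _ _ _ _ hnd' hfresh', hitems, List.zip_cons_cons]
      simp
    · rw [ih _ _ _ _ hnd' hfresh', hitems, List.zip_cons_cons]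
      simp
    · rw [ih _ _ _ _ hnd' hfresh', hitems, List.zip_cons_cons]
      simp

-- while the remainder covers all remaining items (so in particular when ipl = 0), every item gets cur
lemma labSeq_all_rem (ipl : Int) : ∀ (k : Nat) (cur cnt rem : Int), ipl ≤ cnt + 1 → (k : Int) ≤ rem →
    labSeq ipl k cur cnt rem = List.replicate k cur := by
  intro k
  induction k with
  | zero => intro cur cnt rem _ _; simp [labSeq]
  | succ k ih =>
    intro cur cnt rem h1 h2
    have hr : rem > 0 := by push_cast at h2; omega
    simp only [labSeq, if_pos (by omega : cnt + 1 ≥ ipl), if_pos hr, List.replicate_succ]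
    rw [ih cur (cnt + 1) (rem - 1) (by omega) (by push_cast at h2 ⊢; omega)]

-- the first b items of a block (count below the trigger) all get cur
lemma labSeq_pre (ipl : Int) : ∀ (b : Nat) (k : Nat) (cur cnt rem : Int), 0 ≤ cnt → cnt + b + 1 = ipl →
    labSeq ipl (b + k) cur cnt rem = List.replicate b cur ++ labSeq ipl k cur (ipl - 1) rem := by
  intro b
  induction b with
  | zero =>
    intro k cur cnt rem _ h1
    have : cnt = ipl - 1 := by push_cast at h1; omega
    simp [this]
  | succ b ih =>
    intro k cur cnt rem h0 h1
    have hfuel : (b + 1) + k = (b + k) + 1 := by omega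
    rw [hfuel]
    simp only [labSeq, if_neg (by push_cast at h1; omega : ¬ cnt + 1 ≥ ipl), List.replicate_succ]
    rw [ih k cur (cnt + 1) rem (by omega) (by push_cast at h1 ⊢; omega)]
    simp

-- once triggered, the remainder r keeps the level at cur for r + 1 more items, then the level drops
lemma labSeq_rem (ipl : Int) : ∀ (r : Nat) (m : Nat) (cur cnt : Int), ipl ≤ cnt + 1 →
    labSeq ipl ((r + 1) + m) cur cnt (r : Int) = List.replicate (r + 1) cur ++ labSeq ipl m (cur - 1) 0 0 := by
  intro r
  induction r with
  | zero =>
    intro m cur cnt h1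
    rw [show (0 + 1) + m = m + 1 from by omega]
    simp only [labSeq, if_pos (by omega : cnt + 1 ≥ ipl), Nat.cast_zero,
      if_neg (by omega : ¬ (0 : Int) > 0)]
    simp
  | succ r ih =>
    intro m cur cnt h1
    rw [show ((r + 1) + 1) + m = (((r + 1) + m)) + 1 from by omega]
    simp only [labSeq, if_pos (by omega : cnt + 1 ≥ ipl),
      if_pos (by push_cast; omega : ((r + 1 : Nat) : Int) > 0)]
    rw [show ((r + 1 : Nat) : Int) - 1 = (r : Int) from by push_cast; omega,
      ih m cur (cnt + 1) (by omega)]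
    simp [List.replicate_succ]

-- below the top level: k full blocks of ipl items, levels counting down from cur
lemma labSeq_low (ipl : Int) (hipl : 0 < ipl) : ∀ (k : Nat) (cur : Int),
    labSeq ipl (k * ipl.toNat) cur 0 0
      = (PySem.List.pyRange cur (cur - k) (-1)).flatMap (fun lv => List.replicate ipl.toNat lv) := by
  intro k
  induction k with
  | zero =>
    intro cur
    rw [PySem.List.pyRange_neg_one_eq_nil (by push_cast; omega)]
    simp [labSeq]
  | succ k ih =>
    intro cur
    have hmul : (k + 1) * ipl.toNat = k * ipl.toNat + ipl.toNat := Nat.succ_mul k ipl.toNat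
    have hfuel : (k + 1) * ipl.toNat = (ipl.toNat - 1) + ((0 + 1) + k * ipl.toNat) := by omega
    have hrem0 := labSeq_rem ipl 0 (k * ipl.toNat) cur (ipl - 1) (by omega)
    simp only [Nat.cast_zero] at hrem0
    rw [hfuel, labSeq_pre ipl (ipl.toNat - 1) _ cur 0 0 le_rfl (by omega), hrem0,
      PySem.List.pyRange_neg_one_cons (by push_cast; omega : cur - ((k + 1 : Nat) : Int) < cur)]
    have harg : cur - ((k + 1 : Nat) : Int) = (cur - 1) - (k : Int) := by push_cast; omega
    rw [harg, List.flatMap_cons, ← ih (cur - 1), ← List.append_assoc, ← List.replicate_add]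
    congr 2
    omega

-- the full label sequence of A's loop is B's label table
lemma labSeq_eq_labels (L ipl rem : Int) (n : Nat) (hL : 1 ≤ L) (hipl : 0 ≤ ipl) (hrem : 0 ≤ rem)
    (hid : ipl * L + rem = (n : Int)) :
    labSeq ipl n L 0 rem
      = List.replicate (ipl + rem).toNat L ++
        (if ipl > 0 then (PySem.List.pyRange (L - 1) 0 (-1)).flatMap (fun lv => List.replicate ipl.toNat lv)
         else []) := by
  rcases eq_or_lt_of_le hipl with h0 | h0
  · -- ipl = 0 : n = rem, everything is at the top level
    have hipl0 : ipl = 0 := h0.symm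
    rw [hipl0, zero_mul, zero_add] at hid
    rw [hipl0, if_neg (by omega), labSeq_all_rem 0 n L 0 rem (by omega) (by omega)]
    have : ((0 : Int) + rem).toNat = n := by omega
    rw [this, List.append_nil]
  · -- ipl ≥ 1 : top level gets ipl + rem items, then (L-1) blocks of ipl
    have hfuel : n = (ipl.toNat - 1) + ((rem.toNat + 1) + (L.toNat - 1) * ipl.toNat) := by
      have h1 : (ipl.toNat : Int) = ipl := Int.toNat_of_nonneg hipl
      have h3 : (L.toNat : Int) = L := Int.toNat_of_nonneg (by omega)
      have h4 : ((ipl.toNat * L.toNat : Nat) : Int) = ipl * L := by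
        rw [Nat.cast_mul, h1, h3]
      have key : ipl.toNat * L.toNat + rem.toNat = n := by omega
      have h5 : (L.toNat - 1) * ipl.toNat + 1 * ipl.toNat = L.toNat * ipl.toNat := by
        rw [← Nat.add_mul]; congr 1; omega
      have h6 : ipl.toNat * L.toNat = L.toNat * ipl.toNat := Nat.mul_comm _ _
      omega
    have hrr : ((rem.toNat : Int)) = rem := Int.toNat_of_nonneg hrem
    rw [if_pos h0, hfuel,
      labSeq_pre ipl (ipl.toNat - 1) _ L 0 rem le_rfl (by omega)]
    rw [show labSeq ipl ((rem.toNat + 1) + (L.toNat - 1) * ipl.toNat) L (ipl - 1) rem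
          = List.replicate (rem.toNat + 1) L ++ labSeq ipl ((L.toNat - 1) * ipl.toNat) (L - 1) 0 0 by
        rw [← hrr]; exact labSeq_rem ipl rem.toNat _ L (ipl - 1) (by omega)]
    rw [labSeq_low ipl h0 (L.toNat - 1) (L - 1)]
    have harg : (L - 1) - ((L.toNat - 1 : Nat) : Int) = 0 := by omega
    rw [harg, ← List.append_assoc, ← List.replicate_add]
    congr 2
    omega

-- ===== VERDICT (by name: the statement is the Claim_ definition above) =====
theorem assign_levels_spec : Claim_equal_assign_levels := by
  intro sorted_ranks num_levels _hdom hpre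
  obtain ⟨hL, hnd⟩ := hpre
  unfold Spec_assign_levels
  have hLpos : (0 : Int) < num_levels := by omega
  simp only [assign_levels, assign_levels_alt,
    PySem.Int.floordiv_eq_ediv_of_pos hLpos, PySem.Int.mod_eq_emod_of_pos hLpos]
  set n : Nat := sorted_ranks.length with hn
  set ipl : Int := (n : Int) / num_levels with hipl
  set rem : Int := (n : Int) % num_levels with hrem
  have h0 : 0 ≤ ipl := Int.ediv_nonneg (by positivity) (le_of_lt hLpos)
  have h1 : 0 ≤ rem := Int.emod_nonneg _ (by omega)
  have hid : ipl * num_levels + rem = (n : Int) := by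
    have hdm := Int.mul_ediv_add_emod (n : Int) num_levels
    have hc : (n : Int) / num_levels * num_levels = num_levels * ((n : Int) / num_levels) :=
      mul_comm _ _
    rw [hipl, hrem]
    omega
  rw [foldA ipl sorted_ranks PySem.Dict.empty num_levels 0 rem hnd
      (by intro p _; simp [PySem.Dict.contains_empty]),
    labSeq_eq_labels num_levels ipl rem n hL h0 h1 hid]
  simp [PySem.Dict.empty]
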